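-- pv_equiv track=rewrite | github.com/KDHarsh24/HTML-Parser | p.py | identifyTags
-- ===== SOURCE A (Python) =====
-- def identifyTags(htmlCode):
--     tagData = ""
--     blockHtml = []
--     startTag = False
--     for line in htmlCode:
--         for i in range(len(line)):
--             if startTag == True:
--                 tagData += line[i]
--                 if line[i] == '>':
--                     startTag = False
--                     blockHtml.append(tagData)
--                     tagData = ""
--             else:
--                 if line[i] == '<':
--                     startTag = True
--                     blockHtml.append(tagData)
--                     tagData = '<'
--                 else:
--                     tagData += line[i]
--     return blockHtml
-- ===== SOURCE B (Python) =====
-- def identifyTags(htmlCode):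
--     s = ''.join(htmlCode)
--     out = []
--     i = 0
--     while True:
--         j = s.find('<', i)
--         if j == -1:
--             return out
--         out.append(s[i:j])
--         k = s.find('>', j + 1)
--         if k == -1:
--             return out
--         out.append(s[j:k + 1])
--         i = k + 1
-- ===== Notes on version B (the rewrite author's own statement) =====
-- stated objective: simpler
-- what changed: Replaced the per-character boolean state machine accumulating tagData across lines with delimiter-jumping on the joined string: repeatedly find the next '<' (emit the text slice) and the next '>' (emit the tag slice).
import Mathlib
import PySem

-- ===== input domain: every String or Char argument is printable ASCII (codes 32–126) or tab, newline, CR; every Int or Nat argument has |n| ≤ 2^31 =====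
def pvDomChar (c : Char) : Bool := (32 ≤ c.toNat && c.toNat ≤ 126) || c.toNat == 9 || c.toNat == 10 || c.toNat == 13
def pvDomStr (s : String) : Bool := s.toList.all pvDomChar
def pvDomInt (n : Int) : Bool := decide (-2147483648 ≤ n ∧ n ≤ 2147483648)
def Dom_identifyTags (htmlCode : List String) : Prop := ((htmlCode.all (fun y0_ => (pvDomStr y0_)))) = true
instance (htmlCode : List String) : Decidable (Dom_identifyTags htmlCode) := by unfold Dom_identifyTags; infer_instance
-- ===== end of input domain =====

-- B replaces A's per-character state machine by delimiter-jumping on the joined string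
-- (find '<', emit text, find '>', emit tag); objective: simpler. Return value only; no mutation.

-- ===== PORT A =====
-- state = (tagData, blockHtml, startTag); tagData kept as List Char (Python's += on str)
def pvStepA (st : List Char × List String × Bool) (c : Char) : List Char × List String × Bool :=
  let (tagData, blockHtml, startTag) := st
  if startTag = true then
    let tagData := tagData ++ [c]
    if c = '>' then ([], blockHtml ++ [String.ofList tagData], false)
    else (tagData, blockHtml, true)
  else
    if c = '<' then (['<'], blockHtml ++ [String.ofList tagData], true)
    else (tagData ++ [c], blockHtml, false)

def identifyTags (htmlCode : List String) : List String :=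
  (htmlCode.foldl (fun st line => line.toList.foldl pvStepA st) ([], [], false)).2.1

-- ===== PORT B =====
-- Source B's loop on the joined string: s.find('<', i) / s[i:j] are the takeWhile/dropWhile split
-- of the current suffix at the first '<' (exact: find returns the first occurrence), then
-- s.find('>', j+1) / s[j:k+1] likewise at the first '>' after the '<'.
mutual
  -- looking for '<' from the current suffix cs (Source B: j = s.find('<', i); append s[i:j])
  def pvTextB (cs : List Char) : List String :=
    match h : cs.dropWhile (· ≠ '<') with
    | [] => []                                   -- j == -1: return out
    | _ :: rest => String.ofList (cs.takeWhile (· ≠ '<')) :: pvTagB ['<'] rest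
  termination_by cs.length
  decreasing_by
    have h2 := List.length_dropWhile_le (p := fun c => decide (c ≠ '<')) (l := cs)
    rw [h] at h2; simp at h2 ⊢; omega

  -- looking for '>' (Source B: k = s.find('>', j+1); append s[j:k+1]); t is the pending '<'
  def pvTagB (t : List Char) (cs : List Char) : List String :=
    match h : cs.dropWhile (· ≠ '>') with
    | [] => []                                   -- k == -1: return out
    | _ :: rest => String.ofList (t ++ cs.takeWhile (· ≠ '>') ++ ['>']) :: pvTextB rest
  termination_by cs.length
  decreasing_by
    have h2 := List.length_dropWhile_le (p := fun c => decide (c ≠ '>')) (l := cs)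
    rw [h] at h2; simp at h2 ⊢; omega
end

def identifyTags_alt (htmlCode : List String) : List String :=
  pvTextB (String.join htmlCode).toList

-- ===== PRECONDITION & SPEC =====
def Spec_identifyTags (htmlCode : List String) (out : List String) : Prop := out = identifyTags_alt htmlCode
instance (htmlCode : List String) (out : List String) : Decidable (Spec_identifyTags htmlCode out) := by unfold Spec_identifyTags; infer_instance

-- ===== CLAIM (what is proved, stated in full; the proofs are below) =====
def Claim_equal_identifyTags : Prop := ∀ (htmlCode : List String), Dom_identifyTags htmlCode → Spec_identifyTags htmlCode (identifyTags htmlCode)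

-- ===== LEMMAS AND PROOFS =====

-- pvTextB with a pending text accumulator t (A's tagData in the startTag=False state)
def pvTextAux (t : List Char) (cs : List Char) : List String :=
  match cs.dropWhile (· ≠ '<') with
  | [] => []
  | _ :: rest => String.ofList (t ++ cs.takeWhile (· ≠ '<')) :: pvTagB ['<'] rest

theorem pvTextAux_nil (cs : List Char) : pvTextAux [] cs = pvTextB cs := by
  rw [pvTextAux, pvTextB]
  split <;> rename_i heq <;> rw [heq] <;> simp

theorem pv_foldl_lines (htmlCode : List String) (st : List Char × List String × Bool) :
    htmlCode.foldl (fun st line => line.toList.foldl pvStepA st) st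
      = ((htmlCode.map String.toList).flatten).foldl pvStepA st := by
  induction htmlCode generalizing st with
  | nil => rfl
  | cons l ls ih => simp [List.foldl_append, ih]

theorem pv_machine (n : Nat) : ∀ cs : List Char, cs.length ≤ n →
    (∀ t acc, (cs.foldl pvStepA (t, acc, false)).2.1 = acc ++ pvTextAux t cs) ∧
    (∀ t acc, (cs.foldl pvStepA (t, acc, true)).2.1 = acc ++ pvTagB t cs) := by
  induction n with
  | zero =>
    intro cs hcs
    have : cs = [] := List.eq_nil_of_length_eq_zero (Nat.le_zero.mp hcs)
    subst this
    constructor <;> intro t acc <;> simp [pvTextAux, pvTagB]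
  | succ n ih =>
    intro cs hcs
    cases cs with
    | nil => constructor <;> intro t acc <;> simp [pvTextAux, pvTagB]
    | cons c cs' =>
      have hcs' : cs'.length ≤ n := by simpa using hcs
      constructor
      · intro t acc
        by_cases hc : c = '<'
        · subst hc
          have hstep : pvStepA (t, acc, false) '<' = (['<'], acc ++ [String.ofList t], true) := rfl
          rw [List.foldl_cons, hstep, (ih cs' hcs').2]
          simp [pvTextAux]
        · have hstep : pvStepA (t, acc, false) c = (t ++ [c], acc, false) := by
            simp [pvStepA, hc]
          rw [List.foldl_cons, hstep, (ih cs' hcs').1]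
          unfold pvTextAux
          rw [List.dropWhile_cons_of_pos (by simp [hc]), List.takeWhile_cons_of_pos (by simp [hc])]
          cases cs'.dropWhile (· ≠ '<') with
          | nil => rfl
          | cons d rest => simp
      · intro t acc
        by_cases hc : c = '>'
        · subst hc
          have hstep : pvStepA (t, acc, true) '>' = ([], acc ++ [String.ofList (t ++ ['>'])], false) := rfl
          rw [List.foldl_cons, hstep, (ih cs' hcs').1, pvTextAux_nil]
          rw [pvTagB]
          rw [List.dropWhile_cons_of_neg (by simp), List.takeWhile_cons_of_neg (by simp)]
          simp
        · have hstep : pvStepA (t, acc, true) c = (t ++ [c], acc, true) := by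
            simp [pvStepA, hc]
          rw [List.foldl_cons, hstep, (ih cs' hcs').2]
          conv_rhs => rw [pvTagB]
          rw [List.dropWhile_cons_of_pos (by simp [hc]), List.takeWhile_cons_of_pos (by simp [hc])]
          conv_lhs => rw [pvTagB]
          cases cs'.dropWhile (· ≠ '>') with
          | nil => rfl
          | cons d rest => simp

-- ===== VERDICT (by name: the statement is the Claim_ definition above) =====
theorem identifyTags_spec : Claim_equal_identifyTags := by
  intro htmlCode _
  unfold Spec_identifyTags identifyTags identifyTags_alt
  rw [pv_foldl_lines, String.toList_join,
    ((pv_machine _ _ le_rfl).1 [] []), pvTextAux_nil]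
  rfl
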